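-- pv_equiv track=rewrite | github.com/noppayut/WordleCheater | wordler.py | find_best_guess
-- ===== SOURCE A (Python) =====
-- from collections import Counter, defaultdict
-- from itertools import product
--
-- def find_best_guess(candidates):
--     """
--     Find most likely candidates
--     :param candidates:
--     :return:
--     """
--     if not candidates:
--         return []
--     most_probable_alps = get_most_probable_alps_at_each_pos(candidates)
--     most_probable_seqs = list(product(*most_probable_alps))
--     distances = calculate_distances(candidates, most_probable_seqs)
--     min_dist = min(distances)
--     best_guesses = [cand for cand, dist in zip(candidates, distances) if dist == min_dist]
--     return best_guesses
--
-- def get_most_probable_alps_at_each_pos(candidates):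
--     def _get_most_probable_alps(alps_at_pos):
--         mcs = Counter(alps_at_pos).most_common()
--         max_occ = mcs[0][1]
--         most_prob_alps_ = filter(lambda alp_occ: alp_occ[1] == max_occ, mcs)
--         most_prob_alps = [alp for alp, occ in most_prob_alps_]
--         return most_prob_alps
--
--     alp_pos_dict = defaultdict(lambda: [])
--     for cand in candidates:
--         for i, c in enumerate(cand):
--             alp_pos_dict[i].append(c)
--
--     cand_len = len(candidates[0])
--     most_probable_alps = [_get_most_probable_alps(alp_pos_dict[pos]) for pos in range(cand_len)]
--
--     return most_probable_alps
--
-- def _calculate_distance(candidate, most_probable_seqs):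
--     def __calculate_distance_one(seq_1, seq_2):
--         dist = sum([abs(ord(c_1) - ord(c_2)) for c_1, c_2 in zip(seq_1, seq_2)])
--         return dist
--
--     return min((__calculate_distance_one(candidate, mps) for mps in most_probable_seqs))
--
-- def calculate_distances(candidates, most_probable_seqs):
--     return [_calculate_distance(candidate, most_probable_seqs) for candidate in candidates]
-- ===== SOURCE B (Python) =====
-- from collections import Counter
--
-- def find_best_guess(candidates):
--     """Same result as A, but O(N*L*k): distance to the nearest most-probable
--     sequence is additive per position, so sum per-position minimum distances
--     instead of enumerating the Cartesian product of most-probable letters."""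
--     if not candidates:
--         return []
--     n = len(candidates[0])
--     best_alps = []
--     for pos in range(n):
--         col = [c[pos] for c in candidates if pos < len(c)]
--         cnt = Counter(col)
--         m = max(cnt.values())
--         best_alps.append([a for a in cnt if cnt[a] == m])
--     dists = [sum(min(abs(ord(ch) - ord(a)) for a in alps)
--                  for ch, alps in zip(cand, best_alps))
--              for cand in candidates]
--     md = min(dists)
--     return [c for c, d in zip(candidates, dists) if d == md]
-- ===== Notes on version B (the rewrite author's own statement) =====
-- stated objective: alternative
-- what changed: Instead of enumerating the Cartesian product of the most-probable letters per position and taking the min distance over all sequences, B uses that the distance is additive per position and sums the per-position minimum distances to the most-probable letters.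
import Mathlib
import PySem

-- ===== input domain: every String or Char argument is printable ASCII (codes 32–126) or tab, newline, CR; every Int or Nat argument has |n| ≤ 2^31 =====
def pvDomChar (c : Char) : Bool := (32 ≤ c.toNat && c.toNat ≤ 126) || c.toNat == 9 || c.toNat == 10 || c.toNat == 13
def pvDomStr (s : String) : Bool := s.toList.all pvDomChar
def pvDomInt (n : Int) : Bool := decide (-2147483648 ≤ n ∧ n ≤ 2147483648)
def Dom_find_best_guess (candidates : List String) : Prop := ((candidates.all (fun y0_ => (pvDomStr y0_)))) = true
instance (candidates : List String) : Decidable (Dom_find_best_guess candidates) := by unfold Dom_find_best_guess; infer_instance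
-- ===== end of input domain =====

-- B replaces A's enumeration of the Cartesian product of most-probable letters by a sum of
-- per-position minimum distances (distance is additive per position); objective: alternative algorithm.


def pyOrd (c : Char) : Int := (c.toNat : Int)

-- ===== PORT A =====
-- itertools.product(*lists) over lists of chars, in CPython's order (last factor fastest)
def pyProductC : List (List Char) → List (List Char)
  | [] => [[]]
  | l :: rest => l.flatMap (fun x => (pyProductC rest).map (fun t => x :: t))

-- __calculate_distance_one
def distOneA (s1 s2 : List Char) : Int :=
  ((s1.zip s2).map (fun p => |pyOrd p.1 - pyOrd p.2|)).sum

-- _calculate_distance; the default 0 is never used: seqs is nonempty wherever A calls it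
def calcDistA (cand : List Char) (seqs : List (List Char)) : Int :=
  (PySem.List.min? (seqs.map (fun mps => distOneA cand mps)) (fun x => x)).getD 0

-- _get_most_probable_alps; Counter.most_common() = sorted(items, key=count, reverse=True);
-- mcs[0] would raise IndexError on an empty column — unreachable, the default ('?',0) is never used
def mostProbableA (alpsAtPos : List Char) : List Char :=
  let mcs := PySem.List.sorted (PySem.Dict.counter alpsAtPos).items (fun kv => kv.2) true
  let maxOcc := ((PySem.List.pyGet? mcs 0).getD ('?', 0)).2
  (mcs.filter (fun kv => kv.2 == maxOcc)).map (fun kv => kv.1)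

-- the alp_pos_dict defaultdict loop: alp_pos_dict[i].append(c) = modify i [] (· ++ [c])
def buildDictA (candidates : List String) : PySem.Dict Int (List Char) :=
  candidates.foldl
    (fun d cand => (PySem.List.enumerate cand.toList 0).foldl
      (fun d2 p => d2.modify p.1 [] (fun l => l ++ [p.2])) d)
    PySem.Dict.empty

-- get_most_probable_alps_at_each_pos
def mostProbableAlpsA (candidates : List String) : List (List Char) :=
  let d := buildDictA candidates
  let candLen : Int := (((PySem.List.pyGet? candidates 0).getD "").toList.length : Int)
  (PySem.List.pyRange 0 candLen 1).map (fun pos => mostProbableA (d.getD pos []))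

def find_best_guess (candidates : List String) : List String :=
  if candidates = [] then []
  else
    let mpa := mostProbableAlpsA candidates
    let seqs := pyProductC mpa
    let dists := candidates.map (fun cand => calcDistA cand.toList seqs)
    let minDist := (PySem.List.min? dists (fun x => x)).getD 0
    ((candidates.zip dists).filter (fun p => p.2 == minDist)).map (fun p => p.1)

-- ===== PORT B =====
-- [c[pos] for c in candidates if pos < len(c)] — exact for 0 ≤ pos, the only positions B uses
def colB (candidates : List String) (pos : Int) : List Char :=
  candidates.filterMap (fun c => PySem.List.pyGet? c.toList pos)

-- cnt = Counter(col); m = max(cnt.values()); [a for a in cnt if cnt[a] == m]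
-- (max of an empty column would raise — unreachable; the default 0 is never used)
def bestAlpsB (candidates : List String) (pos : Int) : List Char :=
  let cnt := PySem.Dict.counter (colB candidates pos)
  let m := (PySem.List.max? cnt.values (fun x => x)).getD 0
  cnt.keys.filter (fun a => cnt.getD a 0 == m)

-- min(abs(ord(ch) - ord(a)) for a in alps)
def pminB (ch : Char) (alps : List Char) : Int :=
  (PySem.List.min? (alps.map (fun a => |pyOrd ch - pyOrd a|)) (fun x => x)).getD 0

-- sum(min(...) for ch, alps in zip(cand, best_alps))
def distB (cand : List Char) (bos : List (List Char)) : Int :=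
  ((cand.zip bos).map (fun p => pminB p.1 p.2)).sum

def find_best_guess_alt (candidates : List String) : List String :=
  if candidates = [] then []
  else
    let n : Int := (((PySem.List.pyGet? candidates 0).getD "").toList.length : Int)
    let bos := (PySem.List.pyRange 0 n 1).map (fun pos => bestAlpsB candidates pos)
    let dists := candidates.map (fun cand => distB cand.toList bos)
    let md := (PySem.List.min? dists (fun x => x)).getD 0
    ((candidates.zip dists).filter (fun p => p.2 == md)).map (fun p => p.1)

-- ===== PRECONDITION & SPEC =====
def Spec_find_best_guess (candidates : List String) (out : List String) : Prop := out = find_best_guess_alt candidates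
instance (candidates : List String) (out : List String) : Decidable (Spec_find_best_guess candidates out) := by unfold Spec_find_best_guess; infer_instance

-- ===== CLAIM (what is proved, stated in full; the proofs are below) =====
def Claim_equal_find_best_guess : Prop := ∀ (candidates : List String), Dom_find_best_guess candidates → Spec_find_best_guess candidates (find_best_guess candidates)

-- ===== LEMMAS AND PROOFS =====

-- min(xs) / max(xs) as a VALUE: characterised by membership and boundedness
theorem minv_eq {xs : List Int} {v : Int} (hv : v ∈ xs) (hmin : ∀ y ∈ xs, v ≤ y) :
    (PySem.List.min? xs (fun x => x)).getD 0 = v := by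
  cases h : PySem.List.min? xs (fun x => x) with
  | none =>
      rw [PySem.List.min?_eq_none_iff] at h
      subst h; simp at hv
  | some m =>
      have hm := PySem.List.min?_mem h
      have h1 := PySem.List.min?_isMin h v hv
      have h2 := hmin m hm
      simp only [Option.getD_some]
      omega

theorem maxv_eq {xs : List Int} {v : Int} (hv : v ∈ xs) (hmax : ∀ y ∈ xs, y ≤ v) :
    (PySem.List.max? xs (fun x => x)).getD 0 = v := by
  cases h : PySem.List.max? xs (fun x => x) with
  | none =>
      rw [PySem.List.max?_eq_none_iff] at h
      subst h; simp at hv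
  | some m =>
      have hm := PySem.List.max?_mem h
      have h1 := PySem.List.max?_isMax h v hv
      have h2 := hmax m hm
      simp only [Option.getD_some]
      omega

theorem minv_perm {xs ys : List Int} (h : xs.Perm ys) :
    (PySem.List.min? xs (fun x => x)).getD 0 = (PySem.List.min? ys (fun x => x)).getD 0 := by
  cases hy : PySem.List.min? ys (fun x => x) with
  | none =>
      rw [PySem.List.min?_eq_none_iff] at hy
      subst hy
      have : xs = [] := h.eq_nil
      subst this; rfl
  | some m =>
      have hm := PySem.List.min?_mem hy
      have hmin := PySem.List.min?_isMin hy
      rw [Option.getD_some]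
      exact minv_eq (h.mem_iff.mpr hm) (fun y hyx => hmin y (h.subset hyx))

theorem pminB_perm {c : Char} {l l' : List Char} (h : l.Perm l') : pminB c l = pminB c l' := by
  unfold pminB
  exact minv_perm (h.map _)

theorem pyProductC_ne_nil {alps : List (List Char)} (h : ∀ l ∈ alps, l ≠ []) :
    pyProductC alps ≠ [] := by
  induction alps with
  | nil => simp [pyProductC]
  | cons l rest ih =>
      have hl : l ≠ [] := h l (by simp)
      have hr := ih (fun x hx => h x (by simp [hx]))
      obtain ⟨a, l', rfl⟩ := List.exists_cons_of_ne_nil hl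
      obtain ⟨t, r', hpr⟩ := List.exists_cons_of_ne_nil hr
      simp [pyProductC, hpr]

-- the min of { f x + g t : x ∈ l, t ∈ P } splits into min + min
theorem minv_flatMap_add {l : List Char} {P : List (List Char)}
    (f : Char → Int) (g : List Char → Int) (hl : l ≠ []) (hP : P ≠ []) :
    (PySem.List.min? (l.flatMap (fun x => P.map (fun t => f x + g t))) (fun x => x)).getD 0 =
      (PySem.List.min? (l.map f) (fun x => x)).getD 0 +
      (PySem.List.min? (P.map g) (fun x => x)).getD 0 := by
  obtain ⟨x0, hx0, hfx0⟩ : ∃ x0 ∈ l, f x0 = (PySem.List.min? (l.map f) (fun x => x)).getD 0 := by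
    cases h : PySem.List.min? (l.map f) (fun x => x) with
    | none => rw [PySem.List.min?_eq_none_iff] at h; simp_all
    | some m =>
        have hm := PySem.List.min?_mem h
        obtain ⟨x0, hx0, hfx0⟩ := List.mem_map.mp hm
        exact ⟨x0, hx0, by simp [hfx0]⟩
  obtain ⟨t0, ht0, hgt0⟩ : ∃ t0 ∈ P, g t0 = (PySem.List.min? (P.map g) (fun x => x)).getD 0 := by
    cases h : PySem.List.min? (P.map g) (fun x => x) with
    | none => rw [PySem.List.min?_eq_none_iff] at h; simp_all
    | some m =>
        have hm := PySem.List.min?_mem h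
        obtain ⟨t0, ht0, hgt0⟩ := List.mem_map.mp hm
        exact ⟨t0, ht0, by simp [hgt0]⟩
  have hfmin : ∀ x ∈ l, (PySem.List.min? (l.map f) (fun x => x)).getD 0 ≤ f x := by
    intro x hx
    cases h : PySem.List.min? (l.map f) (fun x => x) with
    | none => rw [PySem.List.min?_eq_none_iff] at h; simp_all
    | some m =>
        have := PySem.List.min?_isMin h (f x) (List.mem_map_of_mem hx)
        simpa using this
  have hgmin : ∀ t ∈ P, (PySem.List.min? (P.map g) (fun x => x)).getD 0 ≤ g t := by
    intro t ht
    cases h : PySem.List.min? (P.map g) (fun x => x) with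
    | none => rw [PySem.List.min?_eq_none_iff] at h; simp_all
    | some m =>
        have := PySem.List.min?_isMin h (g t) (List.mem_map_of_mem ht)
        simpa using this
  apply minv_eq
  · exact List.mem_flatMap.mpr ⟨x0, hx0, List.mem_map.mpr ⟨t0, ht0, by omega⟩⟩
  · intro y hy
    obtain ⟨x, hx, hy2⟩ := List.mem_flatMap.mp hy
    obtain ⟨t, ht, rfl⟩ := List.mem_map.mp hy2
    have := hfmin x hx
    have := hgmin t ht
    omega

-- KEY LEMMA: distance is additive per position, so the min over the Cartesian product
-- is the sum of per-position minima
theorem calcDistA_eq_sum (alps : List (List Char)) :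
    ∀ cs : List Char, (∀ l ∈ alps, l ≠ []) →
    calcDistA cs (pyProductC alps) = ((cs.zip alps).map (fun p => pminB p.1 p.2)).sum := by
  induction alps with
  | nil =>
      intro cs _
      unfold calcDistA
      have : distOneA cs [] = 0 := by simp [distOneA]
      simp only [pyProductC, List.map_cons, List.map_nil, this, List.zip_nil_right, List.sum_nil]
      apply minv_eq <;> simp
  | cons l rest ih =>
      intro cs h
      have hl : l ≠ [] := h l (by simp)
      have hrest : ∀ x ∈ rest, x ≠ [] := fun x hx => h x (by simp [hx])
      have hPne : pyProductC rest ≠ [] := pyProductC_ne_nil hrest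
      cases cs with
      | nil =>
          unfold calcDistA
          have hne : pyProductC (l :: rest) ≠ [] := pyProductC_ne_nil h
          obtain ⟨s0, P', hP⟩ := List.exists_cons_of_ne_nil hne
          rw [hP]
          simp only [List.zip_nil_left, List.map_nil, List.sum_nil, List.map_cons]
          apply minv_eq
          · simp [distOneA]
          · intro y hy
            simp only [List.mem_cons, List.mem_map] at hy
            rcases hy with rfl | ⟨t, _, rfl⟩ <;> simp [distOneA]
      | cons c cs' =>
          unfold calcDistA
          have hmaps : (pyProductC (l :: rest)).map (fun mps => distOneA (c :: cs') mps) =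
              l.flatMap (fun x => (pyProductC rest).map
                (fun t => |pyOrd c - pyOrd x| + distOneA cs' t)) := by
            simp only [pyProductC, List.map_flatMap, List.map_map]
            apply List.flatMap_congr
            intro x _
            apply List.map_congr_left
            intro t _
            simp [distOneA, Function.comp]
          rw [hmaps, minv_flatMap_add _ _ hl hPne]
          have ihr := ih cs' hrest
          unfold calcDistA at ihr
          rw [ihr]
          simp [pminB]

-- column filter of the enumerate list: positions below the start never occur
theorem enumerate_filter_lt (cs : List Char) :
    ∀ s pos : Int, pos < s →
      (PySem.List.enumerate cs s).filter (fun p => p.1 == pos) = [] := by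
  induction cs with
  | nil => intro s pos _; simp [PySem.List.enumerate]
  | cons c cs ih =>
      intro s pos hlt
      rw [PySem.List.enumerate_cons]
      have hne : (s == pos) = false := by simp; omega
      simp only [List.filter_cons, hne, Bool.false_eq_true, if_false]
      exact ih (s + 1) pos (by omega)

-- column filter of the enumerate list IS indexing
theorem enumerate_filter_get (cs : List Char) :
    ∀ s pos : Int, s ≤ pos →
      ((PySem.List.enumerate cs s).filter (fun p => p.1 == pos)).map (fun p => p.2) =
        (PySem.List.pyGet? cs (pos - s)).toList := by
  induction cs with
  | nil => intro s pos _; simp [PySem.List.enumerate, PySem.List.pyGet?]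
  | cons c cs ih =>
      intro s pos hle
      rw [PySem.List.enumerate_cons]
      rcases eq_or_lt_of_le hle with rfl | hlt
      · have : (s == s) = true := by simp
        simp only [List.filter_cons, this, if_true,
          enumerate_filter_lt cs (s + 1) s (by omega)]
        simp
      · have hne : (s == pos) = false := by simp; omega
        simp only [List.filter_cons, hne, Bool.false_eq_true, if_false]
        rw [ih (s + 1) pos (by omega)]
        have h1 : PySem.List.pyGet? (c :: cs) (pos - s) = (c :: cs)[(pos - s).toNat]? := by
          rw [PySem.List.pyGet?_of_nonneg _ (by omega)]
        have h2 : PySem.List.pyGet? cs (pos - (s + 1)) = cs[(pos - (s + 1)).toNat]? := by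
          rw [PySem.List.pyGet?_of_nonneg _ (by omega)]
        rw [h1, h2]
        have hk : (pos - s).toNat = (pos - (s + 1)).toNat + 1 := by omega
        rw [hk]
        simp

-- the defaultdict grouping loop yields exactly the column at each nonnegative position
theorem buildDictA_getD (candidates : List String) :
    ∀ (d : PySem.Dict Int (List Char)) (pos : Int), 0 ≤ pos →
      (candidates.foldl
        (fun d cand => (PySem.List.enumerate cand.toList 0).foldl
          (fun d2 p => d2.modify p.1 [] (fun l => l ++ [p.2])) d) d).getD pos [] =
      d.getD pos [] ++ colB candidates pos := by
  induction candidates with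
  | nil => intro d pos _; simp [colB]
  | cons w ws ih =>
      intro d pos hpos
      rw [List.foldl_cons, ih _ pos hpos, PySem.Dict.getD_foldl_modify_append,
        enumerate_filter_get w.toList 0 pos hpos]
      have : pos - 0 = pos := by omega
      rw [this]
      simp [colB, List.filterMap_cons]
      cases PySem.List.pyGet? w.toList pos <;> simp

-- A's most-probable letters at a column are a (nonempty) permutation of B's
theorem mostProbableA_perm (col : List Char) (hcol : col ≠ []) :
    (mostProbableA col).Perm
      (((PySem.Dict.counter col).keys).filter
        (fun a => (PySem.Dict.counter col).getD a 0 ==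
          (PySem.List.max? (PySem.Dict.counter col).values (fun x => x)).getD 0)) ∧
    mostProbableA col ≠ [] := by
  have hitems : (PySem.Dict.counter col).items ≠ [] := by
    rw [PySem.Dict.items_counter]
    obtain ⟨c, cs, rfl⟩ := List.exists_cons_of_ne_nil hcol
    intro hmap
    rw [List.map_eq_nil_iff] at hmap
    have : c ∈ PySem.Set.ofList (c :: cs) := (PySem.Set.mem_ofList _ _).mpr (by simp)
    rw [hmap] at this; simp at this
  obtain ⟨h0, t0, hmcs⟩ := List.exists_cons_of_ne_nil
    ((not_iff_not.mpr (PySem.List.sorted_eq_nil_iff (PySem.Dict.counter col).items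
      (fun kv => kv.2) true)).mpr hitems)
  have hvalues : (PySem.Dict.counter col).values =
      (PySem.Dict.counter col).items.map (fun kv => kv.2) := rfl
  -- the head of most_common has the maximal count, and it equals max(cnt.values())
  have hM : ((PySem.List.pyGet? (PySem.List.sorted (PySem.Dict.counter col).items
        (fun kv => kv.2) true) 0).getD ('?', 0)).2 =
      (PySem.List.max? (PySem.Dict.counter col).values (fun x => x)).getD 0 := by
    rw [hmcs, PySem.List.pyGet?_zero_cons, Option.getD_some]
    have hub := PySem.List.key_head_sorted_rev_ge (PySem.Dict.counter col).items
      (fun kv => kv.2) hmcs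
    have hmem : h0 ∈ (PySem.Dict.counter col).items := by
      rw [← PySem.List.mem_sorted _ (fun kv : Char × Int => kv.2) true, hmcs]; simp
    symm
    apply maxv_eq
    · rw [hvalues]; exact List.mem_map_of_mem hmem
    · intro y hy
      rw [hvalues] at hy
      obtain ⟨kv, hkv, rfl⟩ := List.mem_map.mp hy
      exact hub kv hkv
  constructor
  · unfold mostProbableA
    simp only [hM]
    set M := (PySem.List.max? (PySem.Dict.counter col).values (fun x => x)).getD 0 with hMdef
    have hperm : ((PySem.List.sorted (PySem.Dict.counter col).items (fun kv => kv.2) true).filter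
        (fun kv => kv.2 == M)).Perm ((PySem.Dict.counter col).items.filter (fun kv => kv.2 == M)) :=
      (PySem.List.sorted_perm _ _ _).filter _
    refine (hperm.map _).trans (List.Perm.of_eq ?_)
    rw [PySem.Dict.items_counter, List.filter_map, List.map_map, PySem.Dict.keys_counter]
    show List.map (fun a => a) _ = _
    rw [List.map_id']
    apply List.filter_congr
    intro a _
    simp [Function.comp, PySem.Dict.getD_counter]
  · unfold mostProbableA
    simp only [hmcs, PySem.List.pyGet?_zero_cons, Option.getD_some]
    have hmem : h0 ∈ (h0 :: t0).filter (fun kv => kv.2 == h0.2) := by simp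
    intro hmap
    rw [List.map_eq_nil_iff] at hmap
    rw [hmap] at hmem
    simp at hmem

-- sums of per-position minima agree when the letter lists agree up to permutation
theorem zipsum_congr (f g : Int → List Char) (r : List Int)
    (h : ∀ pos ∈ r, (f pos).Perm (g pos)) :
    ∀ cs : List Char,
      ((cs.zip (r.map f)).map (fun p => pminB p.1 p.2)).sum =
      ((cs.zip (r.map g)).map (fun p => pminB p.1 p.2)).sum := by
  induction r with
  | nil => intro cs; simp
  | cons pos r ih =>
      intro cs
      cases cs with
      | nil => simp
      | cons c cs' =>
          simp only [List.map_cons, List.zip_cons_cons, List.sum_cons]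
          rw [pminB_perm (h pos (by simp)), ih (fun p hp => h p (by simp [hp])) cs']

-- ===== VERDICT (by name: the statement is the Claim_ definition above) =====
theorem find_best_guess_spec : Claim_equal_find_best_guess := by
  intro candidates _
  unfold Spec_find_best_guess find_best_guess find_best_guess_alt
  by_cases hnil : candidates = []
  · simp [hnil]
  · simp only [if_neg hnil]
    obtain ⟨c0, rest, rfl⟩ := List.exists_cons_of_ne_nil hnil
    set n : Int := (((PySem.List.pyGet? (c0 :: rest) 0).getD "").toList.length : Int) with hn
    have hcol : ∀ pos ∈ PySem.List.pyRange 0 n 1, colB (c0 :: rest) pos ≠ [] := by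
      intro pos hpos
      rw [PySem.List.mem_pyRange_one] at hpos
      have hget : PySem.List.pyGet? c0.toList pos = c0.toList[pos.toNat]? := by
        rw [PySem.List.pyGet?_of_nonneg _ hpos.1]
      have hlt : pos.toNat < c0.toList.length := by
        have : pos < (c0.toList.length : Int) := by
          simpa [hn, PySem.List.pyGet?_zero_cons] using hpos.2
        omega
      rw [List.getElem?_eq_getElem hlt] at hget
      simp [colB, hget]
    have hA : ∀ pos ∈ PySem.List.pyRange 0 n 1,
        mostProbableA ((buildDictA (c0 :: rest)).getD pos []) =
          mostProbableA (colB (c0 :: rest) pos) := by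
      intro pos hpos
      rw [PySem.List.mem_pyRange_one] at hpos
      unfold buildDictA
      rw [buildDictA_getD (c0 :: rest) PySem.Dict.empty pos hpos.1, PySem.Dict.getD_empty,
        List.nil_append]
    have hperm : ∀ pos ∈ PySem.List.pyRange 0 n 1,
        (mostProbableA ((buildDictA (c0 :: rest)).getD pos [])).Perm
          (bestAlpsB (c0 :: rest) pos) := by
      intro pos hpos
      rw [hA pos hpos]
      exact (mostProbableA_perm _ (hcol pos hpos)).1
    have hne : ∀ l ∈ mostProbableAlpsA (c0 :: rest), l ≠ [] := by
      intro l hl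
      unfold mostProbableAlpsA at hl
      obtain ⟨pos, hpos, rfl⟩ := List.mem_map.mp hl
      rw [hA pos hpos]
      exact (mostProbableA_perm _ (hcol pos hpos)).2
    have hdists : (fun cand : String => calcDistA cand.toList (pyProductC (mostProbableAlpsA (c0 :: rest)))) =
        (fun cand : String => distB cand.toList
          ((PySem.List.pyRange 0 n 1).map (fun pos => bestAlpsB (c0 :: rest) pos))) := by
      funext cand
      rw [calcDistA_eq_sum _ cand.toList hne]
      unfold mostProbableAlpsA
      unfold distB
      exact zipsum_congr _ _ _ hperm cand.toList
    rw [hdists]
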